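-- pv_equiv track=rewrite | github.com/Gabkings/alogorithms-practise | recursion/bfs_algorithms/traversing_algorithms/countBinaryStrings.py | countBinaryStrings
-- ===== SOURCE A (Python) =====
-- def countBinaryStrings(n: int, k: int) -> int:
--     dp = [[0 for j in range(k + 1)] for i in range(n + 1)]
--     dp[0][0] = 1
--     for i in range(n):
--         for j in range(k + 1):
--             dp[i + 1][0] += dp[i][j]
--             if j < k:
--                 dp[i + 1][j + 1] += dp[i][j]
--     result = 0
--     for j in range(k + 1):
--         result += dp[n][j]
--     return result
-- ===== SOURCE B (Python) =====
-- def countBinaryStrings(n: int, k: int) -> int: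
--     # Linear recurrence with a sliding-window running sum of the last k+1 totals:
--     # f[i] = f[i-1] + ... + f[i-1-k]  (clipped at 0)  + 1 if i <= k (the all-ones string).
--     f = [1]
--     s = 0
--     for i in range(1, n + 1):
--         s += f[i - 1]
--         if i - 2 - k >= 0:
--             s -= f[i - 2 - k]
--         f.append(s + (1 if i <= k else 0))
--     return f[n]
-- ===== Notes on version B (the rewrite author's own statement) =====
-- stated objective: faster
-- what changed: Replaced the (n+1)x(k+1) DP table over trailing-ones states by the linear recurrence f[i] = f[i-1]+...+f[i-1-k] (+1 while i<=k), maintained with a sliding-window running sum, O(n+k) instead of O(n*k).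
import Mathlib
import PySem

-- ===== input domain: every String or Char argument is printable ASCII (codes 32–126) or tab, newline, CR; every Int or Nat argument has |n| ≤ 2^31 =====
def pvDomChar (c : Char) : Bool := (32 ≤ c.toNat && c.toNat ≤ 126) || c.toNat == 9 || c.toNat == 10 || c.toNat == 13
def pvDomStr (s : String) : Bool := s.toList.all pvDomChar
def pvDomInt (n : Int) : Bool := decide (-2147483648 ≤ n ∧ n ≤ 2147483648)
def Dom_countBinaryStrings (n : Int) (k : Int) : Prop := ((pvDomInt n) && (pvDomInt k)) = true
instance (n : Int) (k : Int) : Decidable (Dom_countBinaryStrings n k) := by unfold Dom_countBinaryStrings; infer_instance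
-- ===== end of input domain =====

-- B replaces A's O(n*k) DP table over trailing-ones counts by the linear recurrence
-- f[i] = f[i-1]+...+f[i-1-k] (+1 while i ≤ k) kept with a sliding-window running sum: O(n+k).


-- ===== PORT A =====
-- dp[i][j] reads/writes of the Python list-of-lists (Python lists are arrays: O(1) indexing;
-- indices here are all in range under Pre_)
def pyGet2 (dp : Array (Array Int)) (i j : Nat) : Int := (dp.getD i #[]).getD j 0
def pySet2 (dp : Array (Array Int)) (i j : Nat) (v : Int) : Array (Array Int) :=
  dp.setIfInBounds i ((dp.getD i #[]).setIfInBounds j v)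

-- body of the inner 'for j in range(k + 1)' loop of A
def cbsInnerA (k : Int) (i : Nat) (dp : Array (Array Int)) (j : Nat) : Array (Array Int) :=
  let dp := pySet2 dp (i+1) 0 (pyGet2 dp (i+1) 0 + pyGet2 dp i j)
  if (j : Int) < k then pySet2 dp (i+1) (j+1) (pyGet2 dp (i+1) (j+1) + pyGet2 dp i j) else dp

def countBinaryStrings (n : Int) (k : Int) : Int :=
  let dp : Array (Array Int) :=
    Array.replicate (n+1).toNat (Array.replicate (k+1).toNat (0:Int))
  let dp := pySet2 dp 0 0 1
  let dp := (List.range n.toNat).foldl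
    (fun dp i => (List.range (k+1).toNat).foldl (cbsInnerA k i) dp) dp
  (List.range (k+1).toNat).foldl (fun result j => result + pyGet2 dp n.toNat j) 0

-- ===== PORT B =====
-- body of the 'for i in range(1, n + 1)' loop of B: state = (f, s); i = idx+1
def cbsStepB (k : Int) (st : Array Int × Int) (idx : Nat) : Array Int × Int :=
  let i := idx + 1
  let f := st.1
  let s := st.2 + f.getD (i-1) 0
  let s := if (0:Int) ≤ (i : Int) - 2 - k then s - f.getD ((i : Int) - 2 - k).toNat 0 else s
  (f.push (s + (if (i : Int) ≤ k then 1 else 0)), s)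

def countBinaryStrings_alt (n : Int) (k : Int) : Int :=
  let st := (List.range n.toNat).foldl (cbsStepB k) (#[1], 0)
  st.1.getD n.toNat 0

-- ===== PRECONDITION & SPEC =====
-- Pre_ excludes exactly the inputs (n < 0 or k < 0) on which the Python A raises IndexError.
def Pre_countBinaryStrings (n : Int) (k : Int) : Prop := 0 ≤ n ∧ 0 ≤ k
instance (n : Int) (k : Int) : Decidable (Pre_countBinaryStrings n k) := by
  unfold Pre_countBinaryStrings; infer_instance
def pvWitness_countBinaryStrings : Int × Int := (3, 1)

def Spec_countBinaryStrings (n : Int) (k : Int) (out : Int) : Prop := out = countBinaryStrings_alt n k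
instance (n : Int) (k : Int) (out : Int) : Decidable (Spec_countBinaryStrings n k out) := by
  unfold Spec_countBinaryStrings; infer_instance

-- ===== CLAIM (what is proved, stated in full; the proofs are below) =====
def Claim_equal_countBinaryStrings : Prop :=
  ∀ (n : Int) (k : Int), Dom_countBinaryStrings n k → Pre_countBinaryStrings n k →
    Spec_countBinaryStrings n k (countBinaryStrings n k)

-- ===== LEMMAS AND PROOFS =====

-- List-level shadows of the ports' array operations (the proofs work on these and
-- transfer to the Array ports via `toList`)
def pyGet2L (dp : List (List Int)) (i j : Nat) : Int := (dp.getD i []).getD j 0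
def pySet2L (dp : List (List Int)) (i j : Nat) (v : Int) : List (List Int) :=
  dp.set i ((dp.getD i []).set j v)

def cbsInnerL (k : Int) (i : Nat) (dp : List (List Int)) (j : Nat) : List (List Int) :=
  let dp := pySet2L dp (i+1) 0 (pyGet2L dp (i+1) 0 + pyGet2L dp i j)
  if (j : Int) < k then pySet2L dp (i+1) (j+1) (pyGet2L dp (i+1) (j+1) + pyGet2L dp i j) else dp

def cbsStepBL (k : Int) (st : List Int × Int) (idx : Nat) : List Int × Int :=
  let i := idx + 1
  let f := st.1
  let s := st.2 + f.getD (i-1) 0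
  let s := if (0:Int) ≤ (i : Int) - 2 - k then s - f.getD ((i : Int) - 2 - k).toNat 0 else s
  (f ++ [s + (if (i : Int) ≤ k then 1 else 0)], s)

def toA (l : List (List Int)) : Array (Array Int) := Array.mk (l.map Array.mk)

lemma mk_getD {α : Type} (l : List α) (i : Nat) (d : α) : (Array.mk l).getD i d = l.getD i d := by
  rw [Array.getD_eq_getD_getElem?, List.getD_eq_getElem?_getD]
  simp

lemma mk_setIfInBounds {α : Type} (l : List α) (i : Nat) (x : α) :
    (Array.mk l).setIfInBounds i x = Array.mk (l.set i x) := by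
  rw [← Array.toList_inj, Array.toList_setIfInBounds]

lemma getD_map_mk (l : List (List Int)) (i : Nat) :
    (l.map Array.mk).getD i #[] = Array.mk (l.getD i []) := by
  by_cases h : i < l.length
  · rw [List.getD_eq_getElem?_getD, List.getElem?_map, List.getElem?_eq_getElem h,
        List.getD_eq_getElem?_getD, List.getElem?_eq_getElem h]
    rfl
  · rw [List.getD_eq_getElem?_getD, List.getElem?_map, List.getElem?_eq_none (by simpa using h),
        List.getD_eq_getElem?_getD, List.getElem?_eq_none (by omega)]
    rfl

lemma pyGet2_toA (l : List (List Int)) (i j : Nat) : pyGet2 (toA l) i j = pyGet2L l i j := by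
  unfold pyGet2 pyGet2L toA
  have h1 : (Array.mk (l.map Array.mk)).getD i #[] = Array.mk (l.getD i []) := by
    rw [mk_getD]
    exact getD_map_mk l i
  rw [h1, mk_getD]

lemma pySet2_toA (l : List (List Int)) (i j : Nat) (v : Int) :
    pySet2 (toA l) i j v = toA (pySet2L l i j v) := by
  unfold pySet2 pySet2L toA
  have h1 : (Array.mk (l.map Array.mk)).getD i #[] = Array.mk (l.getD i []) := by
    rw [mk_getD]
    exact getD_map_mk l i
  rw [h1, mk_setIfInBounds, mk_setIfInBounds, ← List.map_set]

lemma cbsInnerA_toA (k : Int) (i : Nat) (l : List (List Int)) (j : Nat) :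
    cbsInnerA k i (toA l) j = toA (cbsInnerL k i l j) := by
  unfold cbsInnerA cbsInnerL
  simp only [pyGet2_toA, pySet2_toA]
  split <;> simp only [pyGet2_toA, pySet2_toA]

lemma cbsStepB_toB (k : Int) (st : List Int × Int) (idx : Nat) :
    cbsStepB k (Array.mk st.1, st.2) idx = (Array.mk (cbsStepBL k st idx).1, (cbsStepBL k st idx).2) := by
  unfold cbsStepB cbsStepBL
  simp only [mk_getD]
  split <;> simp [mk_getD]


-- Abstract model shared by both proofs: A's table row i is `rows K i`,
-- B's f[i] is `g K i`, its running sum is `S K m`.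
def rows (K : Nat) : Nat → List Int
  | 0 => 1 :: List.replicate K 0
  | i+1 => (rows K i).sum :: (rows K i).take K

def g (K i : Nat) : Int := (rows K i).sum

def S (K m : Nat) : Int := ∑ j ∈ Finset.range (min m (K+1)), g K (m-1-j)

-- closed description of a row's entries
def ent (K i j : Nat) : Int := if j < i then g K (i-1-j) else if j = i then 1 else 0

lemma getD_set_self {α : Type} (l : List α) (m : Nat) (a d : α) (h : m < l.length) :
    (l.set m a).getD m d = a := by
  simp [List.getD_eq_getElem?_getD, h]

lemma getD_set_ne {α : Type} (l : List α) (m n : Nat) (a d : α) (h : m ≠ n) :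
    (l.set m a).getD n d = l.getD n d := by
  simp [List.getD_eq_getElem?_getD, List.getElem?_set_ne h]

lemma rows_length (K i : Nat) : (rows K i).length = K + 1 := by
  induction i with
  | zero => simp [rows]
  | succ i ih => simp [rows, ih]

lemma sum_map_range (n : Nat) (f : Nat → Int) :
    ((List.range n).map f).sum = ∑ j ∈ Finset.range n, f j := by
  induction n with
  | zero => simp
  | succ n ih => simp [List.range_succ, Finset.sum_range_succ, ih]

lemma take_succ_getD (l : List Int) (j : Nat) (h : j < l.length) :
    l.take (j+1) = l.take j ++ [l.getD j 0] := by
  rw [List.take_add_one, List.getElem?_eq_getElem h]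
  simp [List.getD_eq_getElem?_getD, List.getElem?_eq_getElem h]

lemma rows_eq (K i : Nat) : rows K i = (List.range (K+1)).map (ent K i) := by
  induction i with
  | zero =>
    apply List.ext_getElem
    · simp [rows]
    · intro m h1 h2
      simp only [rows, List.getElem_map, List.getElem_range, ent]
      cases m with
      | zero => simp
      | succ m => simp [List.getElem_cons_succ, List.getElem_replicate]
  | succ i ih =>
    rw [List.range_succ_eq_map]
    simp only [List.map_cons, List.map_map]
    have h1 : (rows K i).sum = ent K (i+1) 0 := by simp [ent, g]
    have h2 : (rows K i).take K = List.map (ent K (i+1) ∘ Nat.succ) (List.range K) := by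
      rw [ih, ← List.map_take, List.take_range]
      rw [(by omega : min K (K+1) = K)]
      apply List.map_congr_left
      intro j _
      simp only [Function.comp, ent, Nat.succ_eq_add_one]
      by_cases hji : j < i
      · have ha : j + 1 < i + 1 := by omega
        rw [if_pos ha, if_pos hji]
        congr 1
        omega
      · by_cases hje : j = i
        · subst hje
          rw [if_neg (by omega : ¬ (j + 1 < j + 1)), if_pos rfl,
              if_neg (by omega : ¬ (j < j)), if_pos rfl]
        · have ha : ¬ (j + 1 < i + 1) := by omega
          have hb : ¬ (j + 1 = i + 1) := by omega
          rw [if_neg ha, if_neg hb, if_neg hji, if_neg hje]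
    show rows K (i+1) = _
    rw [rows, h1, h2]

lemma ent_split (K i j : Nat) :
    ent K (i+1) j = (if j < i+1 then g K (i-j) else 0) + (if j = i+1 then 1 else 0) := by
  unfold ent
  by_cases h1 : j < i + 1
  · have h2 : j ≠ i + 1 := by omega
    have e : i + 1 - 1 - j = i - j := by omega
    rw [if_pos h1, if_pos h1, if_neg h2, e, add_zero]
  · by_cases h2 : j = i + 1 <;> simp [h1, h2]

lemma g_succ (K i : Nat) :
    g K (i+1) = S K (i+1) + (if i+1 ≤ K then 1 else 0) := by
  have hg : g K (i+1) = ∑ j ∈ Finset.range (K+1), ent K (i+1) j := by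
    rw [g, rows_eq, sum_map_range]
  rw [hg]
  have hsplit : ∑ j ∈ Finset.range (K+1), ent K (i+1) j
      = (∑ j ∈ Finset.range (K+1), (if j < i+1 then g K (i-j) else 0))
        + (∑ j ∈ Finset.range (K+1), (if j = i+1 then 1 else 0)) := by
    rw [← Finset.sum_add_distrib]
    exact Finset.sum_congr rfl (fun j _ => ent_split K i j)
  rw [hsplit]
  congr 1
  · -- first sum = S K (i+1)
    rw [S]
    have hsub : Finset.range (min (i+1) (K+1)) ⊆ Finset.range (K+1) := by
      intro x hx
      simp only [Finset.mem_range] at hx ⊢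
      omega
    rw [← Finset.sum_subset hsub]
    · apply Finset.sum_congr rfl
      intro j hj
      simp only [Finset.mem_range] at hj
      have hji : j < i + 1 := by omega
      have e : i + 1 - 1 - j = i - j := by omega
      rw [if_pos hji, e]
    · intro j hj hnj
      simp only [Finset.mem_range] at hj hnj
      have hji : ¬ (j < i + 1) := by omega
      rw [if_neg hji]
  · rw [Finset.sum_ite_eq' (Finset.range (K+1)) (i+1) (fun _ => (1:Int))]
    by_cases h : i + 1 ≤ K <;> simp [h]

-- ---------- A side ----------

def prow (old : List Int) (K j : Nat) : List Int :=
  (old.take j).sum :: (old.take (min j K) ++ List.replicate (K - min j K) 0)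

lemma take_sum_succ (l : List Int) (j : Nat) (h : j < l.length) :
    (l.take (j+1)).sum = (l.take j).sum + l.getD j 0 := by
  rw [take_succ_getD l j h]
  simp

lemma inner_inv (K i : Nat) (dp : List (List Int)) (old : List Int)
    (hlen : i + 1 < dp.length) (hold : old.length = K + 1)
    (hrow : dp.getD i [] = old) (hz : dp.getD (i+1) [] = List.replicate (K+1) 0) :
    ∀ j, j ≤ K + 1 →
      (List.range j).foldl (cbsInnerL (K : Int) i) dp = dp.set (i+1) (prow old K j) := by
  intro j hj
  induction j with
  | zero =>
    simp only [List.range_zero, List.foldl_nil, prow, Nat.zero_min, Nat.sub_zero,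
      List.take_zero]
    have hrow0 : (0:Int) :: ([] ++ List.replicate K (0:Int)) = List.replicate (K+1) 0 := by
      simp [List.replicate_succ]
    rw [List.sum_nil, hrow0, ← hz, List.getD_eq_getElem?_getD, List.getElem?_eq_getElem hlen]
    simp [List.set_getElem_self]
  | succ j ihj =>
    have hjK : j ≤ K := by omega
    have hjlt : j < old.length := by omega
    rw [List.range_succ, List.foldl_append, List.foldl_cons, List.foldl_nil, ihj (by omega)]
    set oj := old.getD j 0 with hoj
    set v0 := (old.take j).sum + oj with hv0
    set tl := old.take (min j K) ++ List.replicate (K - min j K) (0:Int) with htl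
    have hgrow : (dp.set (i+1) (prow old K j)).getD i [] = old := by
      rw [getD_set_ne _ _ _ _ _ (by omega), hrow]
    have hgself : (dp.set (i+1) (prow old K j)).getD (i+1) [] = prow old K j :=
      getD_set_self _ _ _ _ hlen
    have hstep1 : pySet2L (dp.set (i+1) (prow old K j)) (i+1) 0
          (pyGet2L (dp.set (i+1) (prow old K j)) (i+1) 0
            + pyGet2L (dp.set (i+1) (prow old K j)) i j)
        = dp.set (i+1) (v0 :: tl) := by
      unfold pySet2L pyGet2L
      rw [hgself, hgrow, List.set_set]
      all_goals simp [prow, htl, hv0, hoj]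
    have hlen1 : i + 1 < (dp.set (i+1) (v0 :: tl)).length := by simp [hlen]
    have hgrow1 : (dp.set (i+1) (v0 :: tl)).getD i [] = old := by
      rw [getD_set_ne _ _ _ _ _ (by omega), hrow]
    have hgself1 : (dp.set (i+1) (v0 :: tl)).getD (i+1) [] = v0 :: tl :=
      getD_set_self _ _ _ _ hlen
    simp only [cbsInnerL, hstep1]
    by_cases hcase : (j : Int) < (K : Int)
    · have hjKlt : j < K := by exact_mod_cast hcase
      rw [if_pos hcase]
      have hmin : min j K = j := by omega
      have htkl : (old.take j).length = j := by rw [List.length_take]; omega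
      have hget0 : tl.getD j 0 = 0 := by
        rw [htl, hmin, List.getD_eq_getElem?_getD, List.getElem?_append_right (by omega)]
        rw [htkl, Nat.sub_self]
        have hrep : K - j = (K - j - 1) + 1 := by omega
        rw [hrep, List.replicate_succ]
        simp
      have hgj1 : pyGet2L (dp.set (i+1) (v0 :: tl)) (i+1) (j+1) = 0 := by
        unfold pyGet2L
        rw [hgself1]
        simpa using hget0
      have hgij : pyGet2L (dp.set (i+1) (v0 :: tl)) i j = oj := by
        unfold pyGet2L
        rw [hgrow1, hoj]
      have hrowEq : (v0 :: tl).set (j+1) oj = prow old K (j+1) := by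
        have hsetc : (v0 :: tl).set (j+1) oj = v0 :: tl.set j oj := by simp
        rw [hsetc, prow]
        have hmin1 : min (j+1) K = j + 1 := by omega
        rw [hmin1]
        have hhead : v0 = (old.take (j+1)).sum := by
          rw [take_sum_succ old j hjlt, ← hoj, ← hv0]
        have htail : tl.set j oj = old.take (j+1) ++ List.replicate (K - (j+1)) 0 := by
          rw [htl, hmin, List.set_append_right _ _ (by omega), htkl, Nat.sub_self]
          have hrep : (K - j) = (K - (j+1)) + 1 := by omega
          rw [hrep, List.replicate_succ, take_succ_getD old j hjlt, ← hoj]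
          simp
        rw [hhead, htail]
      rw [hgj1, hgij]
      unfold pySet2L
      rw [hgself1, List.set_set, zero_add, hrowEq]
    · have hjK' : j = K := by
        have : ¬ (j < K) := fun h => hcase (by exact_mod_cast h)
        omega
      rw [if_neg hcase]
      congr 1
      subst hjK'
      rw [prow, htl]
      have hmin : min j j = j := by omega
      have hmin1 : min (j+1) j = j := by omega
      rw [hmin, hmin1, take_sum_succ old j hjlt, ← hoj, ← hv0]

-- the outer loop: after i iterations rows 0..i are final, the rest still zero
def cbsInit (N K : Nat) : List (List Int) :=
  (List.replicate (N+1) (List.replicate (K+1) (0:Int))).set 0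
    ((List.replicate (K+1) (0:Int)).set 0 1)

def cbsIter (N K i : Nat) : List (List Int) :=
  (List.range i).foldl
    (fun dp i' => (List.range (K+1)).foldl (cbsInnerL (K : Int) i') dp) (cbsInit N K)

lemma outer_inv (K N : Nat) :
    ∀ i, i ≤ N →
      (cbsIter N K i).length = N + 1 ∧
      ∀ t, t ≤ N →
        (cbsIter N K i).getD t [] = if t ≤ i then rows K t else List.replicate (K+1) 0 := by
  intro i
  induction i with
  | zero =>
    intro _
    constructor
    · simp [cbsIter, cbsInit]
    · intro t ht
      unfold cbsIter cbsInit
      simp only [List.range_zero, List.foldl_nil]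
      by_cases h0 : t = 0
      · subst h0
        rw [getD_set_self _ _ _ _ (by simp)]
        simp [rows, List.replicate_succ]
      · rw [getD_set_ne _ _ _ _ _ (by omega)]
        rw [List.getD_eq_getElem?_getD, List.getElem?_replicate]
        rw [if_pos (by omega : t < N + 1), if_neg (by omega : ¬ t ≤ 0)]
        simp
  | succ i ihi =>
    intro hi
    obtain ⟨hlen, hrows⟩ := ihi (by omega)
    have hstep : cbsIter N K (i+1)
        = (List.range (K+1)).foldl (cbsInnerL (K : Int) i) (cbsIter N K i) := by
      unfold cbsIter
      rw [show List.range (i+1) = List.range i ++ [i] from List.range_succ,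
          List.foldl_append, List.foldl_cons, List.foldl_nil]
    have hfold : (List.range (K+1)).foldl (cbsInnerL (K : Int) i) (cbsIter N K i)
        = (cbsIter N K i).set (i+1) (prow (rows K i) K (K+1)) := by
      apply inner_inv K i (cbsIter N K i) (rows K i) (by omega) (rows_length K i)
        _ _ (K+1) (le_refl _)
      · rw [hrows i (by omega)]; simp
      · rw [hrows (i+1) (by omega), if_neg (by omega)]
    have hprow : prow (rows K i) K (K+1) = rows K (i+1) := by
      unfold prow
      have h1 : min (K+1) K = K := by omega
      rw [h1, List.take_of_length_le (by rw [rows_length]), Nat.sub_self]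
      simp [rows]
    rw [hstep, hfold, hprow]
    constructor
    · simp [hlen]
    · intro t ht
      by_cases hti : t = i + 1
      · subst hti
        rw [getD_set_self _ _ _ _ (by omega), if_pos (le_refl _)]
      · rw [getD_set_ne _ _ _ _ _ (by omega), hrows t ht]
        by_cases h1 : t ≤ i
        · rw [if_pos h1, if_pos (by omega)]
        · rw [if_neg h1, if_neg (by omega)]

lemma foldl_add_getD (l : List Int) (m : Nat) (a : Int) :
    (List.range m).foldl (fun r j => r + l.getD j 0) a
      = a + ((List.range m).map (fun j => l.getD j 0)).sum := by
  induction m generalizing a with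
  | zero => simp
  | succ m ih =>
    rw [List.range_succ, List.foldl_append, List.foldl_cons, List.foldl_nil, ih,
        List.map_append, List.sum_append]
    simp only [List.map_cons, List.map_nil, List.sum_cons, List.sum_nil]
    ring

lemma map_getD_range (l : List Int) : (List.range l.length).map (fun j => l.getD j 0) = l := by
  apply List.ext_getElem
  · simp
  · intro i h1 h2
    simp [List.getD_eq_getElem?_getD, List.getElem?_eq_getElem h2]

lemma countBinaryStrings_eq_g (N K : Nat) :
    countBinaryStrings (N : Int) (K : Int) = g K N := by
  unfold countBinaryStrings
  have hn1 : ((N : Int) + 1).toNat = N + 1 := by omega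
  have hk1 : ((K : Int) + 1).toNat = K + 1 := by omega
  have hnn : (N : Int).toNat = N := by omega
  rw [hn1, hk1, hnn]
  have hinit : Array.replicate (N+1) (Array.replicate (K+1) (0:Int))
      = toA (List.replicate (N+1) (List.replicate (K+1) 0)) := by
    rw [← Array.toList_inj]
    simp [toA, List.map_replicate]
  have hset0 : pySet2L (List.replicate (N+1) (List.replicate (K+1) (0:Int))) 0 0 1
      = cbsInit N K := by
    unfold pySet2L cbsInit
    congr 1
  simp only [hinit, pySet2_toA, hset0]
  have hin : ∀ (x : List (List Int)) (i : Nat),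
      (List.range (K+1)).foldl (cbsInnerA (K : Int) i) (toA x)
        = toA ((List.range (K+1)).foldl (cbsInnerL (K : Int) i) x) :=
    fun x i => List.foldl_hom toA (fun a j => cbsInnerA_toA (K : Int) i a j)
  have houter : (List.range N).foldl
      (fun dp i => (List.range (K+1)).foldl (cbsInnerA (K : Int) i) dp) (toA (cbsInit N K))
      = toA (cbsIter N K N) := by
    unfold cbsIter
    exact List.foldl_hom toA (fun x i => hin x i)
  simp only [houter]
  obtain ⟨hlen, hrows⟩ := outer_inv K N N (le_refl _)
  have hrowN : (cbsIter N K N).getD N [] = rows K N := by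
    rw [hrows N (le_refl _), if_pos (le_refl _)]
  show (List.range (K+1)).foldl (fun result j => result + pyGet2 (toA (cbsIter N K N)) N j) 0 = g K N
  simp only [pyGet2_toA, pyGet2L, hrowN]
  rw [foldl_add_getD, zero_add]
  have hmr := map_getD_range (rows K N)
  rw [rows_length] at hmr
  rw [hmr, g]

-- ---------- B side ----------

lemma S_zero (K : Nat) : S K 0 = 0 := by simp [S]

lemma g_zero (K : Nat) : g K 0 = 1 := by simp [g, rows, List.sum_replicate]

lemma S_succ_eq (K m : Nat) :
    S K (m+1) = S K m + g K m - (if K + 1 ≤ m then g K (m-1-K) else 0) := by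
  by_cases h : K + 1 ≤ m
  · rw [if_pos h]
    have h1 : min (m+1) (K+1) = K + 1 := by omega
    have h2 : min m (K+1) = K + 1 := by omega
    rw [S, S, h1, h2, Finset.sum_range_succ', Finset.sum_range_succ]
    have e1 : ∀ j, (m + 1 - 1 - (j+1) : Nat) = m - 1 - j := by intro j; omega
    have e2 : (m + 1 - 1 - 0 : Nat) = m := by omega
    simp only [e2]
    rw [Finset.sum_congr rfl (fun j _ => by rw [e1 j])]
    ring
  · rw [if_neg h]
    have h1 : min (m+1) (K+1) = m + 1 := by omega
    have h2 : min m (K+1) = m := by omega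
    rw [S, S, h1, h2, Finset.sum_range_succ']
    have e1 : ∀ j, (m + 1 - 1 - (j+1) : Nat) = m - 1 - j := by intro j; omega
    have e2 : (m + 1 - 1 - 0 : Nat) = m := by omega
    simp only [e2]
    rw [Finset.sum_congr rfl (fun j _ => by rw [e1 j])]
    ring

lemma alt_inv (K : Nat) :
    ∀ m, (List.range m).foldl (cbsStepBL (K : Int)) ([1], 0)
      = ((List.range (m+1)).map (g K), S K m) := by
  intro m
  induction m with
  | zero =>
    simp [S_zero, List.range_succ, g_zero]
  | succ m ih =>
    rw [List.range_succ, List.foldl_append, List.foldl_cons, List.foldl_nil, ih]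
    unfold cbsStepBL
    simp only
    have hf : ((List.range (m+1)).map (g K)).getD (m + 1 - 1) 0 = g K m := by
      rw [List.getD_eq_getElem?_getD]
      simp
    rw [hf]
    have hguard : ((0:Int) ≤ ((m+1 : Nat) : Int) - 2 - (K : Int)) ↔ K + 1 ≤ m := by
      constructor <;> intro h
      · omega
      · push_cast; omega
    have hS : (if (0:Int) ≤ ((m+1 : Nat) : Int) - 2 - (K : Int)
          then S K m + g K m - ((List.range (m+1)).map (g K)).getD (((m+1 : Nat) : Int) - 2 - (K : Int)).toNat 0
          else S K m + g K m) = S K (m+1) := by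
      by_cases h : K + 1 ≤ m
      · rw [if_pos (hguard.mpr h)]
        have ht : (((m+1 : Nat) : Int) - 2 - (K : Int)).toNat = m - 1 - K := by omega
        rw [ht]
        have hlt : m - 1 - K < m + 1 := by omega
        have hfd : ((List.range (m+1)).map (g K)).getD (m-1-K) 0 = g K (m-1-K) := by
          rw [List.getD_eq_getElem?_getD]
          simp [List.getElem?_map, List.getElem?_range hlt]
        rw [hfd, S_succ_eq, if_pos h]
      · rw [if_neg (fun hc => h (hguard.mp hc)), S_succ_eq, if_neg h]
        ring
    rw [hS]
    congr 1
    · -- list component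
      rw [List.range_succ (n := m+1), List.map_append]
      congr 1
      simp only [List.map_cons, List.map_nil]
      congr 1
      have hone : (if ((m+1 : Nat) : Int) ≤ (K : Int) then (1:Int) else 0)
          = (if m + 1 ≤ K then (1:Int) else 0) := by
        by_cases h : m + 1 ≤ K
        · rw [if_pos h, if_pos (by exact_mod_cast h)]
        · rw [if_neg h, if_neg (by exact_mod_cast h)]
      rw [hone, ← g_succ]

lemma countBinaryStrings_alt_eq_g (N K : Nat) :
    countBinaryStrings_alt (N : Int) (K : Int) = g K N := by
  unfold countBinaryStrings_alt
  have hnn : (N : Int).toNat = N := by omega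
  rw [hnn]
  have hfold : (List.range N).foldl (cbsStepB (K : Int)) (#[1], 0)
      = (Array.mk ((List.range N).foldl (cbsStepBL (K : Int)) ([1], 0)).1,
         ((List.range N).foldl (cbsStepBL (K : Int)) ([1], 0)).2) :=
    List.foldl_hom (l := List.range N) (init := (([1], 0) : List Int × Int))
      (fun st : List Int × Int => (Array.mk st.1, st.2))
      (fun st idx => cbsStepB_toB (K : Int) st idx)
  rw [hfold, mk_getD, alt_inv K N]
  simp only
  rw [List.getD_eq_getElem?_getD]
  simp

-- ===== VERDICT (by name: the statement is the Claim_ definition above) =====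
theorem countBinaryStrings_spec : Claim_equal_countBinaryStrings := by
  intro n k _ hpre
  obtain ⟨hn, hk⟩ := hpre
  obtain ⟨N, rfl⟩ := Int.eq_ofNat_of_zero_le hn
  obtain ⟨K, rfl⟩ := Int.eq_ofNat_of_zero_le hk
  unfold Spec_countBinaryStrings
  rw [countBinaryStrings_eq_g, countBinaryStrings_alt_eq_g]
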